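-- pv_equiv track=rewrite | github.com/quadraturerules/quadraturerules | website/webbuilder/markup.py | python_highlight
-- ===== SOURCE A (Python) =====
-- def python_highlight(txt: str) -> str:
--     """Apply syntax highlighting to Python snippet.
--
--     Args:
--         txt: Python snippet
--
--     Returns:
--         Snippet with syntax highlighting
--     """
--     txt = txt.replace(" ", "&nbsp;")
--     out = []
--     for line in txt.split("\n"):
--         comment = ""
--         if "#" in line:
--             lsp = line.split("#", 1)
--             line = lsp[0]
--             comment = f"<span style='color:#FF8800'>#{lsp[1]}</span>"
--
--         lsp = line.split("\"")
--         line = lsp[0]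
--
--         for i, j in enumerate(lsp[1:]):
--             if i % 2 == 0:
--                 line += f"<span style='color:#DD2299'>\"{j}"
--             else:
--                 line += f"\"</span>{j}"
--
--         out.append(line + comment)
--     return "<br />".join(out)
-- ===== SOURCE B (Python) =====
-- def python_highlight(txt: str) -> str:
--     """Apply syntax highlighting to Python snippet.
--
--     Single pass per line: peel the comment off with str.partition, then scan the
--     code character by character with an in_string flag instead of split('"')+parity.
--     """
--     out = []
--     for line in txt.replace(" ", "&nbsp;").split("\n"):
--         code, sep, rest = line.partition("#")
--         comment = f"<span style='color:#FF8800'>#{rest}</span>" if sep else ""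
--         pieces = []
--         in_string = False
--         for ch in code:
--             if ch == '"':
--                 pieces.append('"</span>' if in_string else "<span style='color:#DD2299'>\"")
--                 in_string = not in_string
--             else:
--                 pieces.append(ch)
--         out.append("".join(pieces) + comment)
--     return "<br />".join(out)
-- ===== Notes on version B (the rewrite author's own statement) =====
-- stated objective: alternative
-- what changed: Replaces A's split-on-double-quote plus index-parity reassembly of each line by a single character-by-character scan with an in_string flag (and str.partition for the comment), emitting the span tags as the scan toggles state.
import Mathlib
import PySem

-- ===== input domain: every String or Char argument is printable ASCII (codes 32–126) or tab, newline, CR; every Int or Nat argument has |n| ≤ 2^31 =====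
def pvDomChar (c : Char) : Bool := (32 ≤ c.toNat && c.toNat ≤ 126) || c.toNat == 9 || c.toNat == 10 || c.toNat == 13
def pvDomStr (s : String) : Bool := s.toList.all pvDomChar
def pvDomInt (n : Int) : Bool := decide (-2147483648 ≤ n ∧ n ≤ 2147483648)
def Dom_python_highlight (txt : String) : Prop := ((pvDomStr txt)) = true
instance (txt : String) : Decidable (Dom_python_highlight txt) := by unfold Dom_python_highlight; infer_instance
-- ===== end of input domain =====

-- B replaces A's split-on-double-quote plus parity pass by a single character scan with an in_string flag
-- and str.partition for the comment (objective: alternative decomposition, same cost).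

-- shared string constants (the literal HTML fragments both programs emit)
def pvOpenQ : List Char := "<span style='color:#DD2299'>\"".toList
def pvCloseQ : List Char := "\"</span>".toList
def pvCommentSpan (rest : List Char) : List Char :=
  "<span style='color:#FF8800'>#".toList ++ rest ++ "</span>".toList

-- ===== PORT A =====
-- per-line body of A's loop (comment split, then split('"') + enumerate parity fold)
def pvALine (line : List Char) : List Char :=
  let cc : List Char × List Char :=
    if PySem.Chars.isIn ['#'] line then
      -- lsp[0] / lsp[1]: split('#', 1) returns exactly two pieces when '#' occurs, so getD is exact
      let lsp := PySem.Chars.splitOnMax line ['#'] 1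
      (lsp.getD 0 [], pvCommentSpan (lsp.getD 1 []))
    else (line, [])
  let lsp := PySem.Chars.splitOn cc.1 ['"']
  let body := (PySem.List.enumerate (PySem.List.slice lsp (some 1) none) 0).foldl
    (fun acc ij => if PySem.Int.mod ij.1 2 = 0 then acc ++ pvOpenQ ++ ij.2
                   else acc ++ pvCloseQ ++ ij.2)
    (lsp.getD 0 [])
  body ++ cc.2

def python_highlight (txt : String) : String :=
  let t := PySem.Chars.replace txt.toList [' '] "&nbsp;".toList
  let out := (PySem.Chars.splitOn t ['\n']).foldl (fun acc line => acc ++ [pvALine line]) []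
  String.mk (PySem.Chars.join "<br />".toList out)

-- ===== PORT B =====
-- hand port of Source B's line.partition('#') for the single-char separator '#':
-- none = separator absent (Python's ('', '', line) with empty sep), some (before, after) otherwise; exact
def pvCutHash : List Char → Option (List Char × List Char)
  | [] => none
  | c :: cs =>
    if c = '#' then some ([], cs)
    else match pvCutHash cs with
      | some (a, b) => some (c :: a, b)
      | none => none

-- Source B's character scan with the in_string flag
def pvScan : List Char → Bool → List Char
  | [], _ => []
  | c :: cs, inStr =>
    if c = '"' then (if inStr then pvCloseQ else pvOpenQ) ++ pvScan cs (!inStr)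
    else c :: pvScan cs inStr

def pvBLine (line : List Char) : List Char :=
  match pvCutHash line with
  | some (code, rest) => pvScan code false ++ pvCommentSpan rest
  | none => pvScan line false

def python_highlight_alt (txt : String) : String :=
  let t := PySem.Chars.replace txt.toList [' '] "&nbsp;".toList
  String.mk (PySem.Chars.join "<br />".toList ((PySem.Chars.splitOn t ['\n']).map pvBLine))

-- ===== PRECONDITION & SPEC =====
def Spec_python_highlight (txt : String) (out : String) : Prop := out = python_highlight_alt txt
instance (txt : String) (out : String) : Decidable (Spec_python_highlight txt out) := by unfold Spec_python_highlight; infer_instance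

-- ===== CLAIM (what is proved, stated in full; the proofs are below) =====
def Claim_equal_python_highlight : Prop := ∀ (txt : String), Dom_python_highlight txt → Spec_python_highlight txt (python_highlight txt)

-- ===== LEMMAS AND PROOFS =====

-- structural version of split('"') on a single-character separator
def pvSplit1 (q : Char) : List Char → List (List Char)
  | [] => [[]]
  | c :: cs =>
    if c = q then [] :: pvSplit1 q cs
    else match pvSplit1 q cs with
      | s :: r => (c :: s) :: r
      | [] => [[c]]

-- A's alternating emission over the tail segments, as a structural recursion on the segments
def pvTail (b : Bool) : List (List Char) → List Char
  | [] => []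
  | j :: rest => (if b then pvCloseQ else pvOpenQ) ++ j ++ pvTail (!b) rest

theorem pvSplit1_ne_nil (q : Char) (l : List Char) : pvSplit1 q l ≠ [] := by
  induction l with
  | nil => simp [pvSplit1]
  | cons c cs ih =>
    simp only [pvSplit1]
    split
    · simp
    · cases h : pvSplit1 q cs with
      | nil => exact absurd h ih
      | cons s r => simp

theorem pvMod2 (a : Int) : PySem.Int.mod a 2 = a % 2 := by
  rw [PySem.Int.mod, Int.fmod_eq_emod]; omega

-- splitOn.go on a single-char separator computes pvSplit1 (with the accumulators prepended)
theorem pvSplitOnGo (q : Char) (l : List Char) : ∀ (fuel : Nat) (cur : List Char)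
    (acc : List (List Char)), l.length ≤ fuel →
    PySem.Chars.splitOn.go [q] fuel l cur acc
      = acc.reverse ++ (pvSplit1 q l).modifyHead (cur.reverse ++ ·) := by
  induction l with
  | nil =>
    intro fuel cur acc _
    cases fuel <;> simp [PySem.Chars.splitOn.go, pvSplit1]
  | cons c cs ih =>
    intro fuel cur acc hf
    cases fuel with
    | zero => simp at hf
    | succ f =>
      simp only [PySem.Chars.splitOn.go]
      by_cases hq : q = c
      · subst hq
        simp only [beq_self_eq_true, Bool.true_and, if_pos, List.length_cons,
          List.length_nil, List.drop_succ_cons, List.drop_zero]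
        rw [ih f [] (cur.reverse :: acc) (by simp at hf; omega)]
        cases h : pvSplit1 q cs with
        | nil => exact absurd h (pvSplit1_ne_nil q cs)
        | cons s r => simp [pvSplit1, h]
      · have : ([q].isPrefixOf (c :: cs)) = false := by
          simp [List.isPrefixOf, hq]
        simp only [this, Bool.false_eq_true, if_false, List.tail_cons]
        rw [ih f (c :: cur) acc (by simp at hf; omega)]
        have hcq : ¬ c = q := fun h => hq h.symm
        simp only [pvSplit1, if_neg hcq]
        cases h : pvSplit1 q cs with
        | nil => exact absurd h (pvSplit1_ne_nil q cs)
        | cons s r => simp [h, List.modifyHead]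

theorem pvSplitOn_eq (q : Char) (l : List Char) :
    PySem.Chars.splitOn l [q] = pvSplit1 q l := by
  rw [PySem.Chars.splitOn, pvSplitOnGo q l (l.length + 1) [] [] (by omega)]
  cases h : pvSplit1 q l with
  | nil => exact absurd h (pvSplit1_ne_nil q l)
  | cons s r => simp

-- splitOnMax.go with maxsplit exhausted returns the rest whole
theorem pvSplitOnMaxGo0 (q : Char) (fuel : Nat) (l cur : List Char)
    (acc : List (List Char)) :
    PySem.Chars.splitOnMax.go [q] fuel 0 l cur acc
      = acc.reverse ++ [cur.reverse ++ l] := by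
  cases fuel with
  | zero => simp [PySem.Chars.splitOnMax.go]
  | succ f => cases l <;> simp [PySem.Chars.splitOnMax.go]

-- splitOnMax.go at maxsplit = 1 computes pvCutHash
theorem pvSplitOnMaxGo1 (l : List Char) : ∀ (fuel : Nat) (cur : List Char)
    (acc : List (List Char)), l.length ≤ fuel →
    PySem.Chars.splitOnMax.go ['#'] fuel 1 l cur acc
      = acc.reverse ++ (match pvCutHash l with
          | some (a, b) => [cur.reverse ++ a, b]
          | none => [cur.reverse ++ l]) := by
  induction l with
  | nil =>
    intro fuel cur acc _
    cases fuel <;> simp [PySem.Chars.splitOnMax.go, pvCutHash]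
  | cons c cs ih =>
    intro fuel cur acc hf
    cases fuel with
    | zero => simp at hf
    | succ f =>
      simp only [PySem.Chars.splitOnMax.go, one_ne_zero, if_false]
      by_cases hq : '#' = c
      · subst hq
        simp only [beq_self_eq_true, Bool.true_and, if_pos, List.length_cons,
          List.length_nil, List.drop_succ_cons, List.drop_zero]
        rw [pvSplitOnMaxGo0]
        simp [pvCutHash]
      · have : (['#'].isPrefixOf (c :: cs)) = false := by
          simp [List.isPrefixOf, hq]
        simp only [this, Bool.false_eq_true, if_false, List.tail_cons]
        rw [ih f (c :: cur) acc (by simp at hf; omega)]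
        have hcq : ¬ c = '#' := fun h => hq h.symm
        simp only [pvCutHash, if_neg hcq]
        cases h : pvCutHash cs with
        | none => simp
        | some ab => cases ab; simp

theorem pvSplitOnMax_eq (l : List Char) :
    PySem.Chars.splitOnMax l ['#'] 1
      = match pvCutHash l with
        | some (a, b) => [a, b]
        | none => [l] := by
  rw [PySem.Chars.splitOnMax]
  simp only [show ¬((1 : Int) < 0) by omega, if_false]
  rw [show ((1 : Int)).toNat = 1 from rfl, pvSplitOnMaxGo1 l (l.length + 1) [] [] (by omega)]
  cases h : pvCutHash l with
  | none => simp
  | some ab => cases ab; simp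

theorem pvCutHash_none_iff (l : List Char) : pvCutHash l = none ↔ '#' ∉ l := by
  induction l with
  | nil => simp [pvCutHash]
  | cons c cs ih =>
    simp only [pvCutHash, List.mem_cons]
    by_cases hc : c = '#'
    · subst hc; simp
    · simp only [if_neg hc]
      cases h : pvCutHash cs with
      | none =>
        have hx : '#' ∉ cs := ih.mp h
        simp only [reduceCtorEq, true_iff]
        rintro (h1 | h2)
        · exact hc h1.symm
        · exact hx h2
      | some ab =>
        cases ab
        simp only [reduceCtorEq, false_iff, not_not]
        have : '#' ∈ cs := by
          by_contra hn
          rw [ih.mpr hn] at h; exact absurd h (by simp)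
        exact Or.inr this

theorem pvIsInHash (l : List Char) :
    PySem.Chars.isIn ['#'] l = (pvCutHash l).isSome := by
  cases h : pvCutHash l with
  | none =>
    simp only [Option.isSome_none]
    rw [← Bool.not_eq_true, PySem.Chars.isIn_iff_infix, List.singleton_infix_iff]
    exact (pvCutHash_none_iff l).mp h
  | some ab =>
    simp only [Option.isSome_some]
    rw [PySem.Chars.isIn_iff_infix, List.singleton_infix_iff]
    by_contra hn
    rw [(pvCutHash_none_iff l).mpr hn] at h
    exact absurd h (by simp)

-- A's enumerate fold over the tail segments is pvTail, the parity being the Bool state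
theorem pvFoldEnum (rest : List (List Char)) : ∀ (s : Int)
    (acc : List Char),
    (PySem.List.enumerate rest s).foldl
      (fun acc ij => if PySem.Int.mod ij.1 2 = 0 then acc ++ pvOpenQ ++ ij.2
                     else acc ++ pvCloseQ ++ ij.2) acc
      = acc ++ pvTail (decide (PySem.Int.mod s 2 = 1)) rest := by
  induction rest with
  | nil => intro s acc; simp [PySem.List.enumerate_nil, pvTail]
  | cons j rest ih =>
    intro s acc
    rw [PySem.List.enumerate_cons, List.foldl_cons, ih (s + 1)]
    have h2 := pvMod2 s
    have h2' := pvMod2 (s + 1)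
    rcases PySem.Int.mod_two_eq s with h | h
    · have hs : s % 2 = 0 := by rw [← h2]; exact h
      have hs' : (s + 1) % 2 = 1 := by omega
      have hdvd : (2 : Int) ∣ s := by omega
      simp [pvTail, List.append_assoc, hdvd, hs, hs']
    · have hs : s % 2 = 1 := by rw [← h2]; exact h
      have hs' : (s + 1) % 2 = 0 := by omega
      have hnd : ¬ (2 : Int) ∣ s := by omega
      simp [pvTail, List.append_assoc, hnd, hs, hs']

-- the heart: head-plus-alternating-tail over split('"') equals the character scan
theorem pvSplitScan (cs : List Char) : ∀ (b : Bool),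
    (pvSplit1 '"' cs).getD 0 [] ++ pvTail b ((pvSplit1 '"' cs).drop 1)
      = pvScan cs b := by
  induction cs with
  | nil => intro b; simp [pvSplit1, pvScan, pvTail]
  | cons c cs ih =>
    intro b
    by_cases hc : c = '"'
    · subst hc
      cases h : pvSplit1 '"' cs with
      | nil => exact absurd h (pvSplit1_ne_nil _ cs)
      | cons s r =>
        have hih := ih (!b)
        rw [h] at hih
        have hsp : pvSplit1 '"' ('"' :: cs) = [] :: s :: r := by
          simp [pvSplit1, h]
        have hsc : pvScan ('"' :: cs) b
            = (if b then pvCloseQ else pvOpenQ) ++ pvScan cs (!b) := by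
          simp [pvScan]
        rw [hsp, hsc, ← hih]
        simp only [List.getD_cons_zero, List.drop_succ_cons, List.drop_zero,
          pvTail, List.nil_append]
        simp [List.append_assoc]
    · cases h : pvSplit1 '"' cs with
      | nil => exact absurd h (pvSplit1_ne_nil _ cs)
      | cons s r =>
        have hih := ih b
        rw [h] at hih
        have hsp : pvSplit1 '"' (c :: cs) = (c :: s) :: r := by
          simp [pvSplit1, h, hc]
        have hsc : pvScan (c :: cs) b = c :: pvScan cs b := by
          simp [pvScan, hc]
        rw [hsp, hsc, ← hih]
        simp only [List.getD_cons_zero, List.drop_succ_cons, List.drop_zero]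
        simp

-- per-line equality
theorem pvLine_eq (line : List Char) : pvALine line = pvBLine line := by
  have hd : (decide (PySem.Int.mod 0 2 = 1)) = false := by decide
  simp only [pvALine, pvBLine, PySem.List.slice_from_one]
  rw [pvIsInHash]
  cases h : pvCutHash line with
  | none =>
    simp only [Option.isSome_none, Bool.false_eq_true, if_false, ← List.drop_one]
    rw [pvSplitOn_eq, pvFoldEnum, hd, pvSplitScan line false]
    simp
  | some ab =>
    rcases ab with ⟨a, b⟩
    simp only [Option.isSome_some, eq_self_iff_true, if_true, ← List.drop_one]
    rw [pvSplitOnMax_eq, h]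
    simp only [List.getD_cons_zero, List.getD_cons_succ]
    rw [pvSplitOn_eq, pvFoldEnum, hd, pvSplitScan a false]

-- ===== VERDICT (by name: the statement is the Claim_ definition above) =====
theorem python_highlight_spec : Claim_equal_python_highlight := by
  intro txt _
  unfold Spec_python_highlight
  simp only [python_highlight, python_highlight_alt,
    PySem.List.foldl_append_singleton_eq_map, List.nil_append]
  congr 2
  exact List.map_congr_left (fun l _ => pvLine_eq l)
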